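-- pv_equiv track=rewrite | github.com/berylhu43/OCR_pipeline | finetune/prepare_dataset.py | detect_date_columns
-- ===== SOURCE A (Python) =====
-- from typing import Dict, List, Optional, Set, Tuple
--
-- def detect_date_columns(headers: tuple) -> Tuple[Optional[int], Optional[int]]:
--     """Return (year_col_idx, month_col_idx); None when absent."""
--     year_names  = {"annee", "year", "Year", "Annee", "ANNEE"}
--     month_names = {"mois", "month", "Month", "Mois", "MOIS"}
--     year_col = month_col = None
--     for i, h in enumerate(headers):
--         if h in year_names:
--             year_col = i
--         if h in month_names:
--             month_col = i
--     return year_col, month_col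
-- ===== SOURCE B (Python) =====
-- def detect_date_columns(headers):
--     """Return (year_col_idx, month_col_idx); None when absent."""
--     # Build a last-position index once, then look the candidate names up directly:
--     # the last matching column is the max of the names' last positions.
--     last = {}
--     for i, h in enumerate(headers):
--         last[h] = i
--
--     def pick(names):
--         hits = [last[n] for n in names if n in last]
--         return max(hits) if hits else None
--
--     return (pick(("annee", "year", "Year", "Annee", "ANNEE")),
--             pick(("mois", "month", "Month", "Mois", "MOIS")))
-- ===== Notes on version B (the rewrite author's own statement) =====
-- stated objective: alternative
-- what changed: Instead of testing every header against the two name sets during the scan, B builds a header-to-last-index dictionary once and then looks the five candidate names of each category up directly, returning the maximum of their positions; the per-header set-membership tests disappear.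
import Mathlib
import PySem

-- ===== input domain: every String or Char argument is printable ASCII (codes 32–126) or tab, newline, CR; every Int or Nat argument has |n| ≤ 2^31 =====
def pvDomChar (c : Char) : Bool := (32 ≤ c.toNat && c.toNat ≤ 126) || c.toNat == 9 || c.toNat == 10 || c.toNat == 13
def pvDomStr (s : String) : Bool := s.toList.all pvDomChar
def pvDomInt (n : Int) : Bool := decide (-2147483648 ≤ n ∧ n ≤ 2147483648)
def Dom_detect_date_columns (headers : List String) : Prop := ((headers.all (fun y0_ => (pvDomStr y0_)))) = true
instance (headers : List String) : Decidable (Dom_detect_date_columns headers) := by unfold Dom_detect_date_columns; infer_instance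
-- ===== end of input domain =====

-- B builds a header->last-index dictionary once, then looks the candidate names up and takes the max position; same return value by a different (index-based) algorithm.


-- ===== PORT A =====
def pvYearNames : PySem.Set String := PySem.Set.ofList ["annee", "year", "Year", "Annee", "ANNEE"]
def pvMonthNames : PySem.Set String := PySem.Set.ofList ["mois", "month", "Month", "Mois", "MOIS"]

-- forward pass: every match overwrites the accumulator
def detect_date_columns (headers : List String) : Option Int × Option Int :=
  (PySem.List.enumerate headers).foldl
    (fun (st : Option Int × Option Int) (p : Int × String) =>
      let st1 := if PySem.Set.contains pvYearNames p.2 then (some p.1, st.2) else st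
      if PySem.Set.contains pvMonthNames p.2 then (st1.1, some p.1) else st1)
    (none, none)

-- ===== PORT B =====
def pvYearList : List String := ["annee", "year", "Year", "Annee", "ANNEE"]
def pvMonthList : List String := ["mois", "month", "Month", "Mois", "MOIS"]

-- 'hits = [last[n] for n in names if n in last]; max(hits) if hits else None'
def pvPick (last : PySem.Dict String Int) (names : List String) : Option Int :=
  let hits := names.filterMap (fun n => last.get? n)
  if hits = [] then none else hits.max?

def detect_date_columns_alt (headers : List String) : Option Int × Option Int :=
  let last := (PySem.List.enumerate headers).foldl (fun d p => d.insert p.2 p.1) PySem.Dict.empty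
  (pvPick last pvYearList, pvPick last pvMonthList)

-- ===== PRECONDITION & SPEC =====
def Spec_detect_date_columns (headers : List String) (out : Option Int × Option Int) : Prop := out = detect_date_columns_alt headers
instance (headers : List String) (out : Option Int × Option Int) : Decidable (Spec_detect_date_columns headers out) := by unfold Spec_detect_date_columns; infer_instance

-- ===== CLAIM =====
def Claim_equal_detect_date_columns : Prop := ∀ (headers : List String), Dom_detect_date_columns headers → Spec_detect_date_columns headers (detect_date_columns headers)

-- ===== LEMMAS AND PROOFS =====

-- the dictionary B's first loop builds
def pvDictOf (l : List (Int × String)) : PySem.Dict String Int :=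
  l.foldl (fun d p => d.insert p.2 p.1) PySem.Dict.empty

theorem pvDictOf_append_singleton (l : List (Int × String)) (p : Int × String) :
    pvDictOf (l ++ [p]) = (pvDictOf l).insert p.2 p.1 := by
  simp [pvDictOf]

-- every value stored by pvDictOf came from the list
theorem pvDictOf_val_mem (l : List (Int × String)) (n : String) (v : Int)
    (h : (pvDictOf l).get? n = some v) : (v, n) ∈ l := by
  induction l using List.reverseRecOn with
  | nil => simp [pvDictOf, PySem.Dict.get?_empty] at h
  | append_singleton l p ih =>
    rw [pvDictOf_append_singleton, PySem.Dict.get?_insert] at h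
    by_cases hn : n = p.2
    · simp [hn] at h
      simp [← h, hn]
    · simp [hn] at h
      exact List.mem_append_left _ (ih h)

-- first matching index in a list of (index, header) pairs
def pvFirst (names : PySem.Set String) : List (Int × String) → Option Int
  | [] => none
  | (i, h) :: rest => if PySem.Set.contains names h then some i else pvFirst names rest

-- the max of the candidate names' last positions is the last matching index
theorem pvPick_eq (l : List (Int × String)) (names : List String)
    (hs : List.Pairwise (fun p q : Int × String => p.1 < q.1) l) :
    pvPick (pvDictOf l) names = pvFirst (PySem.Set.ofList names) l.reverse := by
  induction l using List.reverseRecOn with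
  | nil => simp [pvPick, pvDictOf, PySem.Dict.get?_empty, pvFirst]
  | append_singleton l p ih =>
    obtain ⟨i, h⟩ := p
    rw [List.pairwise_append] at hs
    obtain ⟨hl, -, hb⟩ := hs
    have hb' : ∀ q ∈ l, q.1 < i := fun q hq => hb q hq (i, h) (by simp)
    rw [pvDictOf_append_singleton]
    simp only [List.reverse_append, List.reverse_cons, List.reverse_nil, List.nil_append,
      List.cons_append, pvFirst]
    by_cases hmem : h ∈ names
    · -- the new header matches: its index i dominates every stored value
      have hmax : (names.filterMap (fun n => ((pvDictOf l).insert h i).get? n)).max? = some i := by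
        rw [List.max?_eq_some_iff]
        constructor
        · exact List.mem_filterMap.mpr ⟨h, hmem, by simp⟩
        · intro b hbmem
          obtain ⟨n, hn, hget⟩ := List.mem_filterMap.mp hbmem
          rw [PySem.Dict.get?_insert] at hget
          by_cases hnh : n = h
          · simp [hnh] at hget; omega
          · simp [hnh] at hget
            exact le_of_lt (hb' (b, n) (pvDictOf_val_mem l n b hget))
      have hne : names.filterMap (fun n => ((pvDictOf l).insert h i).get? n) ≠ [] := by
        intro he; rw [he] at hmax; simp at hmax
      simp [pvPick, hmax, hne, hmem]
    · -- the new header matches no candidate: the lookups are unchanged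
      have hcong : names.filterMap (fun n => ((pvDictOf l).insert h i).get? n)
          = names.filterMap (fun n => (pvDictOf l).get? n) := by
        apply List.filterMap_congr
        intro n hn
        rw [PySem.Dict.get?_insert]
        have : n ≠ h := fun he => hmem (he ▸ hn)
        simp [this]
      have hc : PySem.Set.contains (PySem.Set.ofList names) h = false := by
        rw [Bool.eq_false_iff]
        intro hcon
        exact hmem ((PySem.Set.mem_ofList names h).mp ((PySem.Set.contains_iff _ h).mp hcon))
      simp only [pvPick, hcong, hc, Bool.false_eq_true, if_false]
      exact ih hl

-- A's forward overwrite fold computes the last match = first match of the reverse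
theorem pvFirst_append (names : PySem.Set String) (l r : List (Int × String)) :
    pvFirst names (l ++ r) = (pvFirst names l).or (pvFirst names r) := by
  induction l with
  | nil => rfl
  | cons p l ih =>
    obtain ⟨i, h⟩ := p
    simp only [List.cons_append, pvFirst]
    split
    · rfl
    · exact ih

theorem foldA_eq (l : List (Int × String)) : ∀ (y m : Option Int),
    l.foldl
      (fun (st : Option Int × Option Int) (p : Int × String) =>
        let st1 := if PySem.Set.contains pvYearNames p.2 then (some p.1, st.2) else st
        if PySem.Set.contains pvMonthNames p.2 then (st1.1, some p.1) else st1)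
      (y, m)
    = ((pvFirst pvYearNames l.reverse).or y, (pvFirst pvMonthNames l.reverse).or m) := by
  induction l with
  | nil => intro y m; simp [pvFirst]
  | cons p rest ih =>
    intro y m
    obtain ⟨i, h⟩ := p
    simp only [List.foldl_cons, List.reverse_cons, pvFirst_append]
    by_cases hy : h ∈ pvYearNames <;>
      by_cases hm : h ∈ pvMonthNames <;>
        simp only [ih, pvFirst] <;>
          cases hY : pvFirst pvYearNames rest.reverse <;>
            cases hM : pvFirst pvMonthNames rest.reverse <;>
              simp [Option.or, hy, hm]

-- ===== VERDICT =====
theorem detect_date_columns_spec : Claim_equal_detect_date_columns := by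
  intro headers _
  unfold Spec_detect_date_columns detect_date_columns detect_date_columns_alt
  rw [foldA_eq]
  have hp := PySem.List.pairwise_lt_enumerate headers 0
  show _ = (pvPick (pvDictOf (PySem.List.enumerate headers)) pvYearList,
            pvPick (pvDictOf (PySem.List.enumerate headers)) pvMonthList)
  rw [pvPick_eq _ _ hp, pvPick_eq _ _ hp,
    show PySem.Set.ofList pvYearList = pvYearNames from rfl,
    show PySem.Set.ofList pvMonthList = pvMonthNames from rfl]
  cases pvFirst pvYearNames (PySem.List.enumerate headers).reverse <;>
    cases pvFirst pvMonthNames (PySem.List.enumerate headers).reverse <;>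
      simp [Option.or]
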